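-- pv_equiv track=rewrite | github.com/mightachi/MasteringCodingInterview | python/findCount_candles.py | max_candle_groups
-- ===== SOURCE A (Python) =====
-- def max_candle_groups(n, colors):
--     from collections import Counter
--
--     # Count the occurrences of each color
--     color_counts = Counter(colors)
--
--     # Get the counts of each color
--     counts = list(color_counts.values())
--
--     # Sort counts in descending order
--     counts.sort(reverse=True)
--
--     groups = 0
--
--     # Form groups of 3 as long as we have at least 3 different colors
--     while len(counts) >= 3:
--         # Create a group of the top 3 colors
--         groups += 1
--         counts[0] -= 1  # Using one candle from the color with max count
--         counts[1] -= 1  # Using one candle from the second color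
--         counts[2] -= 1  # Using one candle from the third color
--
--         # Remove colors that have count reduced to zero
--         counts = [count for count in counts if count > 0]
--
--         # Sort again to maintain the order
--         counts.sort(reverse=True)
--
--     return groups
-- ===== SOURCE B (Python) =====
-- def max_candle_groups(n, colors):
--     from collections import Counter
--
--     counts = list(Counter(colors).values())
--     total = sum(counts)
--
--     # Largest g with sum(min(c, g) for c in counts) >= 3*g, found by binary search
--     # (the predicate is downward closed).
--     lo, hi = 0, total // 3
--     while lo < hi:
--         mid = lo + (hi - lo + 1) // 2
--         if sum(min(c, mid) for c in counts) >= 3 * mid: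
--             lo = mid
--         else:
--             hi = mid - 1
--     return lo
-- ===== Notes on version B (the rewrite author's own statement) =====
-- stated objective: faster
-- what changed: A repeatedly decrements the three largest counts, filters zeros and re-sorts until fewer than three colours remain; B binary-searches the largest g with sum(min(c, g) for c in counts) >= 3*g, a closed characterisation of the greedy answer.
import Mathlib
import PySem

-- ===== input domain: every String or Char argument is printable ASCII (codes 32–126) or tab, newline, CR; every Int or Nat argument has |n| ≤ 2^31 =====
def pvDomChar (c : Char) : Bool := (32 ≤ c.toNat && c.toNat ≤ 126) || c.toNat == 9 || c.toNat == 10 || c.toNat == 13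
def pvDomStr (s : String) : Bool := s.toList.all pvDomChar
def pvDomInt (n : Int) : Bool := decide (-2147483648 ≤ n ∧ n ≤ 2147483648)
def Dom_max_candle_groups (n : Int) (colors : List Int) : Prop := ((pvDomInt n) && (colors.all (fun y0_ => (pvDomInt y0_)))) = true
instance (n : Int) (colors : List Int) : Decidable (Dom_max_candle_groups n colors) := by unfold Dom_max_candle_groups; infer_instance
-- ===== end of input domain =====

-- B replaces A's decrement-filter-resort greedy loop by a binary search for the largest g
-- with sum(min(c, g) for c in counts) >= 3*g (objective: faster).

-- ===== PORT A =====

-- counts[0] -= 1; counts[1] -= 1; counts[2] -= 1  (only reached when len(counts) >= 3)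
def pvDec3 (l : List Int) : List Int :=
  match l with
  | a :: b :: c :: rest => (a - 1) :: (b - 1) :: (c - 1) :: rest
  | l => l

-- A's while-loop; the fuel only makes the recursion total (proved sufficient below)
def pvLoopA (fuel : Nat) (counts : List Int) (groups : Int) : Int :=
  match fuel with
  | 0 => groups
  | fuel + 1 =>
    if 3 ≤ counts.length then
      pvLoopA fuel
        (PySem.List.sorted ((pvDec3 counts).filter (fun c => decide (0 < c))) (fun x => x) true)
        (groups + 1)
    else groups

def max_candle_groups (n : Int) (colors : List Int) : Int :=
  let counts := PySem.List.sorted (PySem.Dict.counter colors).values (fun x => x) true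
  pvLoopA ((counts.map Int.toNat).sum + counts.length + 1) counts 0

-- ===== PORT B =====

-- sum(min(c, g) for c in counts)
def pvFmin (counts : List Int) (g : Int) : Int := (counts.map (fun c => min c g)).sum

-- B's binary-search loop: largest g in [lo, hi] with the capped-sum condition
def pvBS (counts : List Int) (lo hi : Int) : Int :=
  if h : lo < hi then
    let mid := lo + PySem.Int.floordiv (hi - lo + 1) 2
    if 3 * mid ≤ pvFmin counts mid then pvBS counts mid hi
    else pvBS counts lo (mid - 1)
  else lo
termination_by (hi - lo).toNat
decreasing_by
  · have he : PySem.Int.floordiv (hi - lo + 1) 2 = (hi - lo + 1) / 2 :=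
      PySem.Int.floordiv_eq_ediv_of_pos (by omega)
    simp only [he]; omega
  · have he : PySem.Int.floordiv (hi - lo + 1) 2 = (hi - lo + 1) / 2 :=
      PySem.Int.floordiv_eq_ediv_of_pos (by omega)
    simp only [he]; omega

def max_candle_groups_alt (n : Int) (colors : List Int) : Int :=
  let counts := (PySem.Dict.counter colors).values
  let total := counts.sum
  pvBS counts 0 (PySem.Int.floordiv total 3)

-- ===== PRECONDITION & SPEC =====
def Spec_max_candle_groups (n : Int) (colors : List Int) (out : Int) : Prop := out = max_candle_groups_alt n colors
instance (n : Int) (colors : List Int) (out : Int) : Decidable (Spec_max_candle_groups n colors out) := by unfold Spec_max_candle_groups; infer_instance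

-- ===== CLAIM (what is proved, stated in full; the proofs are below) =====
def Claim_equal_max_candle_groups : Prop := ∀ (n : Int) (colors : List Int), Dom_max_candle_groups n colors → Spec_max_candle_groups n colors (max_candle_groups n colors)

-- ===== LEMMAS AND PROOFS =====

-- the invariant predicate: g groups of three distinct colours are simultaneously formable
def pvP (counts : List Int) (g : Int) : Prop := 3 * g ≤ pvFmin counts g

theorem pvFmin_sub_one (l : List Int) (g : Int) :
    pvFmin l (g - 1) = pvFmin l g - (l.countP (fun x => decide (g ≤ x)) : Int) := by
  induction l with
  | nil => simp [pvFmin]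
  | cons x t ih =>
    simp only [pvFmin, List.map_cons, List.sum_cons] at *
    rw [List.countP_cons]
    by_cases h : g ≤ x <;> simp [h] <;> omega

theorem pvFmin_ge_count (l : List Int) (g : Int) (hpos : ∀ x ∈ l, 0 ≤ x) :
    g * (l.countP (fun x => decide (g ≤ x)) : Int) ≤ pvFmin l g := by
  induction l with
  | nil => simp [pvFmin]
  | cons x t ih =>
    have hx := hpos x (by simp)
    have iht := ih (fun y hy => hpos y (by simp [hy]))
    simp only [pvFmin, List.map_cons, List.sum_cons] at *
    rw [List.countP_cons]
    by_cases h : g ≤ x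
    · have hmin : min x g = g := min_eq_right h
      simp [h]
      nlinarith [iht, hmin]
    · have hmin : min x g = x := min_eq_left (by omega)
      simp [h]
      linarith [iht, hx, hmin.le, hmin.ge]

theorem pvFmin_le_sum (l : List Int) (g : Int) : pvFmin l g ≤ l.sum := by
  induction l with
  | nil => simp [pvFmin]
  | cons x t ih => simp only [pvFmin, List.map_cons, List.sum_cons] at *; omega

theorem pvFmin_perm {l l' : List Int} (h : l.Perm l') (g : Int) : pvFmin l g = pvFmin l' g :=
  (h.map _).sum_eq

theorem pvFmin_filter_pos (l : List Int) (g : Int) (hpos : ∀ x ∈ l, 0 ≤ x) (hg : 0 ≤ g) :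
    pvFmin (l.filter (fun c => decide (0 < c))) g = pvFmin l g := by
  induction l with
  | nil => simp [pvFmin]
  | cons x t ih =>
    have hx := hpos x (by simp)
    have iht := ih (fun y hy => hpos y (by simp [hy]))
    by_cases h : (0:Int) < x
    · simp only [List.filter_cons, h, decide_true, if_true, pvFmin, List.map_cons, List.sum_cons] at *
      omega
    · have hx0 : x = 0 := by omega
      simp only [List.filter_cons, h, decide_false, pvFmin, List.map_cons, List.sum_cons] at *
      subst hx0; simp; omega

theorem pvFmin_zero (l : List Int) (hpos : ∀ x ∈ l, 0 ≤ x) : pvFmin l 0 = 0 := by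
  induction l with
  | nil => simp [pvFmin]
  | cons x t ih =>
    have hx := hpos x (by simp)
    have iht := ih (fun y hy => hpos y (by simp [hy]))
    simp only [pvFmin, List.map_cons, List.sum_cons] at *; omega

theorem pvFmin_one (l : List Int) (hpos : ∀ x ∈ l, 1 ≤ x) : pvFmin l 1 = l.length := by
  induction l with
  | nil => simp [pvFmin]
  | cons x t ih =>
    have hx := hpos x (by simp)
    have iht := ih (fun y hy => hpos y (by simp [hy]))
    simp only [pvFmin, List.map_cons, List.sum_cons, List.length_cons] at *
    push_cast; omega

-- downward closure of pvP: one step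
theorem pvP_step_down (l : List Int) (g : Int) (hpos : ∀ x ∈ l, 0 ≤ x) (hg : 1 ≤ g)
    (h : pvP l g) : pvP l (g - 1) := by
  unfold pvP at *
  rw [pvFmin_sub_one]
  set m : Int := (l.countP (fun x => decide (g ≤ x)) : Int) with hm
  have hm0 : 0 ≤ m := by positivity
  by_cases hc : m ≤ 3
  · omega
  · have := pvFmin_ge_count l g hpos
    rw [← hm] at this
    nlinarith

-- downward closure of pvP
theorem pvP_down (l : List Int) (g g' : Int) (hpos : ∀ x ∈ l, 0 ≤ x) (hg' : 0 ≤ g')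
    (hle : g' ≤ g) (h : pvP l g) : pvP l g' := by
  have hd : ∀ k : Nat, ∀ g : Int, 0 ≤ g - k → pvP l g → pvP l (g - k) := by
    intro k
    induction k with
    | zero => intro g _ h; simpa using h
    | succ k ih =>
      intro g hgk h
      have h1 : pvP l (g - 1) := pvP_step_down l g hpos (by push_cast at hgk; omega) h
      have := ih (g - 1) (by push_cast at hgk ⊢; omega) h1
      have he : g - 1 - (k : Int) = g - ((k : Nat) + 1 : Nat) := by push_cast; ring
      rwa [he] at this
  have hk : ∃ k : Nat, g' = g - k := ⟨(g - g').toNat, by omega⟩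
  obtain ⟨k, rfl⟩ := hk
  exact hd k g (by omega) h

-- one greedy step of A preserves pvP, shifted by one
theorem pvP_greedy_step (a b c : Int) (rest : List Int) (g : Int)
    (hsort : (a :: b :: c :: rest).Pairwise (fun x y => y ≤ x))
    (hpos : ∀ x ∈ a :: b :: c :: rest, 1 ≤ x) (hg : 1 ≤ g) :
    (pvP (a :: b :: c :: rest) g ↔
      pvP (PySem.List.sorted ((pvDec3 (a :: b :: c :: rest)).filter (fun c => decide (0 < c))) (fun x => x) true) (g - 1)) := by
  have hposd : ∀ x ∈ pvDec3 (a :: b :: c :: rest), 0 ≤ x := by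
    intro x hx
    simp only [pvDec3, List.mem_cons] at hx
    rcases hx with rfl | rfl | rfl | hx
    · have := hpos a (by simp); omega
    · have := hpos b (by simp); omega
    · have := hpos c (by simp); omega
    · have := hpos x (by simp [hx]); omega
  have hperm := PySem.List.sorted_perm ((pvDec3 (a :: b :: c :: rest)).filter (fun c => decide (0 < c))) (fun x : Int => x) true
  have h1 : pvFmin (PySem.List.sorted ((pvDec3 (a :: b :: c :: rest)).filter (fun c => decide (0 < c))) (fun x => x) true) (g - 1)
      = pvFmin (pvDec3 (a :: b :: c :: rest)) (g - 1) := by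
    rw [pvFmin_perm hperm]
    exact pvFmin_filter_pos _ _ hposd (by omega)
  -- the decrement identity
  have h2 : pvFmin (pvDec3 (a :: b :: c :: rest)) (g - 1)
      = pvFmin (a :: b :: c :: rest) g - 3 - (rest.countP (fun x => decide (g ≤ x)) : Int) := by
    simp only [pvDec3, pvFmin, List.map_cons, List.sum_cons]
    have hr := pvFmin_sub_one rest g
    simp only [pvFmin] at hr
    rw [hr]
    have e1 : min (a - 1) (g - 1) = min a g - 1 := by omega
    have e2 : min (b - 1) (g - 1) = min b g - 1 := by omega
    have e3 : min (c - 1) (g - 1) = min c g - 1 := by omega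
    rw [e1, e2, e3]; ring
  set m : Int := (rest.countP (fun x => decide (g ≤ x)) : Int) with hm
  have hm0 : 0 ≤ m := by positivity
  unfold pvP
  rw [h1, h2]
  constructor
  · intro h
    by_cases hc : m = 0
    · omega
    · -- some rest element is ≥ g, so by sortedness a, b, c ≥ g as well
      have hex : ∃ x ∈ rest, g ≤ x := by
        by_contra hno
        push Not at hno
        have : rest.countP (fun x => decide (g ≤ x)) = 0 := by
          rw [List.countP_eq_zero]
          intro x hx
          simp [hno x hx]
        omega
      obtain ⟨x, hxmem, hxg⟩ := hex
      rw [List.pairwise_cons] at hsort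
      obtain ⟨ha, hsort2⟩ := hsort
      rw [List.pairwise_cons] at hsort2
      obtain ⟨hb, hsort3⟩ := hsort2
      rw [List.pairwise_cons] at hsort3
      obtain ⟨hc', _⟩ := hsort3
      have hcg : g ≤ c := le_trans hxg (hc' x hxmem)
      have hbg : g ≤ b := le_trans hcg (hb c (by simp))
      have hag : g ≤ a := le_trans hbg (ha b (by simp))
      have hcount : ((a :: b :: c :: rest).countP (fun x => decide (g ≤ x)) : Int) = m + 3 := by
        simp only [List.countP_cons, hag, hbg, hcg, decide_true, if_true]
        push_cast; omega
      have hgc := pvFmin_ge_count (a :: b :: c :: rest) g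
        (fun x hx => le_trans (by omega) (hpos x hx))
      rw [hcount] at hgc
      nlinarith
  · intro h
    omega

-- the accumulator of A's loop is a pure offset
theorem pvLoopA_acc (fuel : Nat) (l : List Int) (g : Int) :
    pvLoopA fuel l g = g + pvLoopA fuel l 0 := by
  induction fuel generalizing l g with
  | zero => simp [pvLoopA]
  | succ f ih =>
    simp only [pvLoopA]
    by_cases h : 3 ≤ l.length
    · simp only [h, if_true]
      rw [ih _ (g + 1), ih _ (0 + 1)]
      ring
    · simp [h]

-- the fuel measure decreases by at least 3 at each greedy step
theorem pvMu_step (a b c : Int) (rest : List Int)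
    (hpos : ∀ x ∈ a :: b :: c :: rest, 1 ≤ x) :
    (((PySem.List.sorted ((pvDec3 (a :: b :: c :: rest)).filter (fun c => decide (0 < c))) (fun x => x) true).map Int.toNat).sum
      + (PySem.List.sorted ((pvDec3 (a :: b :: c :: rest)).filter (fun c => decide (0 < c))) (fun x => x) true).length) + 3
    ≤ (((a :: b :: c :: rest).map Int.toNat).sum + (a :: b :: c :: rest).length) := by
  have hperm := PySem.List.sorted_perm ((pvDec3 (a :: b :: c :: rest)).filter (fun c => decide (0 < c))) (fun x : Int => x) true
  rw [(hperm.map Int.toNat).sum_eq, hperm.length_eq]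
  have hfil : ∀ (l : List Int),
      ((l.filter (fun c => decide (0 < c))).map Int.toNat).sum + (l.filter (fun c => decide (0 < c))).length
        ≤ (l.map Int.toNat).sum + l.length := by
    intro l
    induction l with
    | nil => simp
    | cons x t ih =>
      by_cases h : (0:Int) < x <;> simp [h] <;> omega
  have h1 := hfil (pvDec3 (a :: b :: c :: rest))
  have ha := hpos a (by simp)
  have hb := hpos b (by simp)
  have hc := hpos c (by simp)
  simp only [pvDec3, List.map_cons, List.sum_cons, List.length_cons] at *
  omega

-- A's loop result is nonnegative, satisfies pvP, and is maximal by one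
theorem pvLoopA_char (fuel : Nat) (l : List Int)
    (hsort : l.Pairwise (fun x y => y ≤ x)) (hpos : ∀ x ∈ l, 1 ≤ x)
    (hfuel : (l.map Int.toNat).sum + l.length + 1 ≤ fuel) :
    0 ≤ pvLoopA fuel l 0 ∧ pvP l (pvLoopA fuel l 0) ∧ ¬ pvP l (pvLoopA fuel l 0 + 1) := by
  induction fuel generalizing l with
  | zero => omega
  | succ f ih =>
    by_cases h : 3 ≤ l.length
    · obtain ⟨a, b, c, rest, rfl⟩ : ∃ a b c rest, l = a :: b :: c :: rest := by
        match l, h with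
        | a :: b :: c :: rest, _ => exact ⟨a, b, c, rest, rfl⟩
      set l' := PySem.List.sorted ((pvDec3 (a :: b :: c :: rest)).filter (fun c => decide (0 < c))) (fun x : Int => x) true with hl'
      have hperm := PySem.List.sorted_perm ((pvDec3 (a :: b :: c :: rest)).filter (fun c => decide (0 < c))) (fun x : Int => x) true
      have hsort' : l'.Pairwise (fun x y => y ≤ x) :=
        PySem.List.sorted_pairwise_rev ((pvDec3 (a :: b :: c :: rest)).filter (fun c => decide (0 < c))) (fun x : Int => x)
      have hpos' : ∀ x ∈ l', 1 ≤ x := by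
        intro x hx
        have hx2 := hperm.mem_iff.mp hx
        rw [List.mem_filter] at hx2
        have := hx2.2
        simp only [decide_eq_true_eq] at this
        omega
      have hmu := pvMu_step a b c rest hpos
      rw [← hl'] at hmu
      have hfuel' : (l'.map Int.toNat).sum + l'.length + 1 ≤ f := by
        simp only [List.map_cons, List.sum_cons, List.length_cons] at hfuel hmu ⊢
        omega
      obtain ⟨ih0, ih1, ih2⟩ := ih l' hsort' hpos' hfuel'
      have hstep : pvLoopA (f + 1) (a :: b :: c :: rest) 0 = 1 + pvLoopA f l' 0 := by
        conv_lhs => rw [pvLoopA]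
        rw [if_pos h, ← hl', pvLoopA_acc]
        omega
      rw [hstep]
      refine ⟨by omega, ?_, ?_⟩
      · have := (pvP_greedy_step a b c rest (1 + pvLoopA f l' 0) hsort hpos (by omega)).mpr
        have he : 1 + pvLoopA f l' 0 - 1 = pvLoopA f l' 0 := by ring
        rw [he] at this
        exact this ih1
      · intro hcon
        have := (pvP_greedy_step a b c rest (1 + pvLoopA f l' 0 + 1) hsort hpos (by omega)).mp hcon
        have he : 1 + pvLoopA f l' 0 + 1 - 1 = pvLoopA f l' 0 + 1 := by ring
        rw [he] at this
        exact ih2 this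
    · have hstop : pvLoopA (f + 1) l 0 = 0 := by simp [pvLoopA, h]
      rw [hstop]
      refine ⟨le_refl 0, ?_, ?_⟩
      · unfold pvP
        rw [pvFmin_zero l (fun x hx => by have := hpos x hx; omega)]
        omega
      · unfold pvP
        rw [zero_add, pvFmin_one l hpos]
        push_cast
        omega

-- B's binary search finds the largest g with pvP (pvP is downward closed)
theorem pvBS_char (counts : List Int) (lo hi : Int)
    (hpos : ∀ x ∈ counts, 0 ≤ x)
    (hlo0 : 0 ≤ lo) (hlohi : lo ≤ hi) (hplo : pvP counts lo)
    (hhi : ∀ g, pvP counts g → g ≤ hi) :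
    lo ≤ pvBS counts lo hi ∧ pvP counts (pvBS counts lo hi) ∧
      ∀ g, pvP counts g → g ≤ pvBS counts lo hi := by
  have hgen : ∀ k : Nat, ∀ lo hi : Int, (hi - lo).toNat ≤ k → 0 ≤ lo → lo ≤ hi →
      pvP counts lo → (∀ g, pvP counts g → g ≤ hi) →
      lo ≤ pvBS counts lo hi ∧ pvP counts (pvBS counts lo hi) ∧
        ∀ g, pvP counts g → g ≤ pvBS counts lo hi := by
    intro k
    induction k with
    | zero =>
      intro lo hi hk h0 hle hp hb
      have : lo = hi := by omega
      subst this
      rw [pvBS, dif_neg (by omega)]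
      exact ⟨le_refl _, hp, hb⟩
    | succ k ih =>
      intro lo hi hk h0 hle hp hb
      by_cases h : lo < hi
      · have he : PySem.Int.floordiv (hi - lo + 1) 2 = (hi - lo + 1) / 2 :=
          PySem.Int.floordiv_eq_ediv_of_pos (by omega)
        set mid := lo + PySem.Int.floordiv (hi - lo + 1) 2 with hmid
        have hmid1 : lo < mid := by rw [hmid, he]; omega
        have hmid2 : mid ≤ hi := by rw [hmid, he]; omega
        rw [pvBS, dif_pos h]
        rw [← hmid]
        by_cases hcond : 3 * mid ≤ pvFmin counts mid
        · rw [if_pos hcond]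
          exact (ih mid hi (by omega) (by omega) hmid2 hcond hb).imp (by omega) id
        · rw [if_neg hcond]
          have hb' : ∀ g, pvP counts g → g ≤ mid - 1 := by
            intro g hg
            by_contra hcon
            exact hcond (pvP_down counts g mid hpos (by omega) (by omega) hg)
          exact ih lo (mid - 1) (by omega) h0 (by omega) hp hb'
      · rw [pvBS, dif_neg h]
        exact ⟨le_refl _, hp, fun g hg => by have := hb g hg; omega⟩
  exact hgen (hi - lo).toNat lo hi (le_refl _) hlo0 hlohi hplo hhi

-- every multiplicity recorded by Counter is at least 1
theorem pvCounter_values_pos (colors : List Int) :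
    ∀ x ∈ (PySem.Dict.counter colors).values, 1 ≤ x := by
  intro x hx
  rw [show (PySem.Dict.counter colors).values = (PySem.Dict.counter colors).items.map (·.2) from rfl,
    PySem.Dict.items_counter] at hx
  simp only [List.map_map, List.mem_map] at hx
  obtain ⟨k, hk, hkx⟩ := hx
  have hkmem : k ∈ colors := (PySem.Set.mem_ofList _ _).mp hk
  have : 0 < colors.count k := List.count_pos_iff.mpr hkmem
  simp only [Function.comp] at hkx
  rw [← hkx]
  exact_mod_cast this

-- ===== VERDICT (by name: the statement is the Claim_ definition above) =====
theorem max_candle_groups_spec : Claim_equal_max_candle_groups := by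
  intro n colors _
  show max_candle_groups n colors = max_candle_groups_alt n colors
  have hgoal : max_candle_groups n colors = pvLoopA (((PySem.List.sorted (PySem.Dict.counter colors).values (fun x => x) true).map Int.toNat).sum + (PySem.List.sorted (PySem.Dict.counter colors).values (fun x => x) true).length + 1) (PySem.List.sorted (PySem.Dict.counter colors).values (fun x => x) true) 0 := rfl
  have hgoal' : max_candle_groups_alt n colors = pvBS (PySem.Dict.counter colors).values 0 (PySem.Int.floordiv (PySem.Dict.counter colors).values.sum 3) := rfl
  rw [hgoal, hgoal']
  set counts := (PySem.Dict.counter colors).values with hc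
  set sc := PySem.List.sorted counts (fun x : Int => x) true with hsc
  have hpos : ∀ x ∈ counts, 1 ≤ x := pvCounter_values_pos colors
  have hpos0 : ∀ x ∈ counts, 0 ≤ x := fun x hx => by have := hpos x hx; omega
  have hperm : sc.Perm counts := PySem.List.sorted_perm counts (fun x : Int => x) true
  -- pvP transfers between the sorted and unsorted count lists
  have htrans : ∀ g, pvP sc g ↔ pvP counts g := by
    intro g; unfold pvP; rw [pvFmin_perm hperm]
  -- A's side
  have hsort : sc.Pairwise (fun x y => y ≤ x) :=
    PySem.List.sorted_pairwise_rev counts (fun x : Int => x)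
  have hposs : ∀ x ∈ sc, 1 ≤ x := fun x hx => hpos x (hperm.mem_iff.mp hx)
  obtain ⟨hA0, hA1, hA2⟩ := pvLoopA_char ((sc.map Int.toNat).sum + sc.length + 1) sc hsort hposs (le_refl _)
  rw [htrans] at hA1
  rw [htrans] at hA2
  -- B's side
  have hP0 : pvP counts 0 := by unfold pvP; rw [pvFmin_zero counts hpos0]; omega
  have he3 : PySem.Int.floordiv counts.sum 3 = counts.sum / 3 :=
    PySem.Int.floordiv_eq_ediv_of_pos (by omega)
  have hhi : ∀ g, pvP counts g → g ≤ PySem.Int.floordiv counts.sum 3 := by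
    intro g hg
    have h1 : 3 * g ≤ pvFmin counts g := hg
    have h2 := pvFmin_le_sum counts g
    rw [he3]; omega
  have hhi0 : 0 ≤ PySem.Int.floordiv counts.sum 3 := hhi 0 hP0
  obtain ⟨hB0, hB1, hB2⟩ := pvBS_char counts 0 (PySem.Int.floordiv counts.sum 3) hpos0 (le_refl _) hhi0 hP0 hhi
  -- the two characterisations pin down the same value
  have hle : pvLoopA ((sc.map Int.toNat).sum + sc.length + 1) sc 0 ≤ pvBS counts 0 (PySem.Int.floordiv counts.sum 3) :=
    hB2 _ hA1
  by_contra hne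
  have hlt : pvLoopA ((sc.map Int.toNat).sum + sc.length + 1) sc 0 < pvBS counts 0 (PySem.Int.floordiv counts.sum 3) := by
    omega
  exact hA2 (pvP_down counts _ _ hpos0 (by omega) (by omega) hB1)
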